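-- pv_equiv track=rewrite | github.com/liuzhuogood/PyPark | PyPark/util/util.py | cut_list_num
-- ===== SOURCE A (Python) =====
-- def cut_list_num(data_list: list, cut_num=1):
--     """
--     把数组切成指定份数返回数据下标数组
--     :param data_list: 源数组
--     :param cut_num: 切份数
--     :return:
--     """
--     if data_list is None:
--         return None
--     # 数据的份数
--     data_nums = len(data_list)
--     # 数据分片开始
--     cut_start = 0
--     # 分片的数量
--     # 分片大小,为0表示不分片
--     cut_size = data_nums // cut_num
--     yu = data_nums % cut_num
--     results = []
--     for i in range(0, cut_num):
--         # 先分余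
--         if yu > 0:
--             yu -= 1
--             cut_end = cut_start + cut_size + 1
--         else:
--             cut_end = cut_start + cut_size
--         # 是不是最后的一片
--         if cut_end > data_nums - cut_size:
--             cut_end = data_nums
--         results.append((cut_start, cut_end))
--         cut_start = cut_end
--     return results
-- ===== SOURCE B (Python) =====
-- def cut_list_num(data_list: list, cut_num=1):
--     """Same result as A, but each (start, end) range is computed directly
--     from its index i by closed-form arithmetic instead of a running
--     accumulator with yu-decrement and a last-piece guard."""
--     if data_list is None:
--         return None
--     data_nums = len(data_list)
--     cut_size = data_nums // cut_num
--     yu = data_nums % cut_num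
--     results = []
--     for i in range(cut_num):
--         start = i * cut_size + min(i, yu)
--         end = start + cut_size + (1 if i < yu else 0)
--         results.append((start, end))
--     return results
-- ===== Notes on version B (the rewrite author's own statement) =====
-- stated objective: simpler
-- what changed: Replaces A's sequential accumulation (running cut_start, mutating yu countdown, and a no-op last-piece clamp) with a direct closed-form computation of each range from its index i: start = i*cut_size + min(i, yu), end = start + cut_size + (1 if i < yu else 0).
import Mathlib
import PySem

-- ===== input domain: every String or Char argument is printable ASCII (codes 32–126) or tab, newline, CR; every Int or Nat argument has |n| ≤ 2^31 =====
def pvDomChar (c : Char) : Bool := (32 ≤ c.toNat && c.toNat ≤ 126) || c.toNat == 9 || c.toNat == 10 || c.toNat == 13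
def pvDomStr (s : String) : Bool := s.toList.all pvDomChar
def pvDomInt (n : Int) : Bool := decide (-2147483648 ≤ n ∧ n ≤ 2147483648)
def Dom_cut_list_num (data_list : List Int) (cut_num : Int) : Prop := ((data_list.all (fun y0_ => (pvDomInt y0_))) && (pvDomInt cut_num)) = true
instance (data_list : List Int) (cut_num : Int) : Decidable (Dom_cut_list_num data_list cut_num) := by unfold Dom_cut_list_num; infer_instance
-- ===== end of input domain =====

-- B computes each (start, end) directly from its index by closed-form arithmetic,
-- replacing A's running accumulator, yu countdown and no-op last-piece clamp (objective: simpler).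

-- ===== PORT A =====
-- loop body of A: state is (yu, cut_start, results)
def cutListNumStepA (data_nums cut_size : Int)
    (st : Int × Int × List (Int × Int)) (_i : Int) : Int × Int × List (Int × Int) :=
  let yu := st.1
  let cut_start := st.2.1
  let results := st.2.2
  let p := if yu > 0 then (yu - 1, cut_start + cut_size + 1) else (yu, cut_start + cut_size)
  let yu' := p.1
  let cut_end := p.2
  let cut_end' := if cut_end > data_nums - cut_size then data_nums else cut_end
  (yu', cut_end', results ++ [(cut_start, cut_end')])

def cut_list_num (data_list : List Int) (cut_num : Int) : Option (List (Int × Int)) :=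
  let data_nums : Int := data_list.length
  let cut_size := PySem.Int.floordiv data_nums cut_num
  let yu := PySem.Int.mod data_nums cut_num
  let fin := (PySem.List.pyRange 0 cut_num 1).foldl (cutListNumStepA data_nums cut_size) (yu, 0, [])
  some fin.2.2

-- ===== PORT B =====
def cut_list_num_alt (data_list : List Int) (cut_num : Int) : Option (List (Int × Int)) :=
  let data_nums : Int := data_list.length
  let cut_size := PySem.Int.floordiv data_nums cut_num
  let yu := PySem.Int.mod data_nums cut_num
  some ((PySem.List.pyRange 0 cut_num 1).foldl
    (fun results i =>
      let start := i * cut_size + min i yu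
      let e := start + cut_size + (if i < yu then 1 else 0)
      results ++ [(start, e)]) [])

-- ===== PRECONDITION & SPEC =====
-- Pre_ excludes only cut_num = 0, on which Python A raises ZeroDivisionError.
def Pre_cut_list_num (data_list : List Int) (cut_num : Int) : Prop := cut_num ≠ 0
instance (data_list : List Int) (cut_num : Int) : Decidable (Pre_cut_list_num data_list cut_num) := by unfold Pre_cut_list_num; infer_instance

def pvWitness_cut_list_num : List Int × Int := ([1, 2, 3, 4, 5], 2)

def Spec_cut_list_num (data_list : List Int) (cut_num : Int) (out : Option (List (Int × Int))) : Prop := out = cut_list_num_alt data_list cut_num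
instance (data_list : List Int) (cut_num : Int) (out : Option (List (Int × Int))) : Decidable (Spec_cut_list_num data_list cut_num out) := by unfold Spec_cut_list_num; infer_instance

-- ===== CLAIM (what is proved, stated in full; the proofs are below) =====
def Claim_equal_cut_list_num : Prop := ∀ (data_list : List Int) (cut_num : Int), Dom_cut_list_num data_list cut_num → Pre_cut_list_num data_list cut_num → Spec_cut_list_num data_list cut_num (cut_list_num data_list cut_num)

-- ===== LEMMAS AND PROOFS =====

-- B's closed form for piece i
def cutPiece (cut_size yu : Int) (i : Int) : Int × Int :=
  (i * cut_size + min i yu, i * cut_size + min i yu + cut_size + (if i < yu then 1 else 0))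

lemma foldl_append_map {α β : Type} (f : α → β) :
    ∀ (l : List α) (acc : List β),
      l.foldl (fun r i => r ++ [f i]) acc = acc ++ l.map f := by
  intro l
  induction l with
  | nil => simp
  | cons x xs ih => intro acc; simp [List.foldl, ih]

lemma loopA_closed (n cn s y : Int) (hcn : 0 < cn) (hs : 0 ≤ s) (hy0 : 0 ≤ y)
    (hylt : y < cn) (hn : s * cn + y = n) :
    ∀ (k : Nat) (a : Int) (acc : List (Int × Int)), 0 ≤ a → a + k = cn →
      (PySem.List.pyRange a cn 1).foldl (cutListNumStepA n s)
        (y - min a y, a * s + min a y, acc)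
      = (y - min cn y, cn * s + min cn y,
         acc ++ (PySem.List.pyRange a cn 1).map (cutPiece s y)) := by
  intro k
  induction k with
  | zero =>
      intro a acc _ hak
      have ha : a = cn := by omega
      subst ha
      rw [PySem.List.pyRange_one_eq_nil (le_refl _)]
      simp
  | succ m ih =>
      intro a acc ha0 hak
      have halt : a < cn := by omega
      rw [PySem.List.pyRange_one_cons halt]
      simp only [List.foldl_cons, List.map_cons]
      have hstep : cutListNumStepA n s (y - min a y, a * s + min a y, acc) a
          = (y - min (a + 1) y, (a + 1) * s + min (a + 1) y,
             acc ++ [cutPiece s y a]) := by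
        simp only [cutListNumStepA, cutPiece]
        by_cases h1 : y - min a y > 0
        · have hi : a < y := by omega
          have hmin : min a y = a := by omega
          have hmin' : min (a + 1) y = a + 1 := by omega
          simp only [if_pos h1, if_pos hi]
          have hclamp : (if a * s + min a y + s + 1 > n - s then n
              else a * s + min a y + s + 1) = a * s + min a y + s + 1 := by
            rw [if_neg]
            intro h2
            rw [hmin] at h2
            nlinarith [mul_nonneg hs (show (0:ℤ) ≤ cn - a - 2 by omega)]
          rw [hclamp]
          simp only [Prod.mk.injEq]
          refine ⟨by omega, by rw [hmin, hmin']; ring, by simp⟩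
        · have hi : ¬ a < y := by omega
          have hmin : min a y = y := by omega
          have hmin' : min (a + 1) y = y := by omega
          simp only [if_neg h1, if_neg hi]
          have hclamp : (if a * s + min a y + s > n - s then n
              else a * s + min a y + s) = a * s + min a y + s := by
            by_cases h2 : a * s + min a y + s > n - s
            · rw [if_pos h2, hmin] at *
              have h4 : cn - a - 2 < 0 := by
                by_contra hge
                have hge' : (0:ℤ) ≤ cn - a - 2 := by omega
                nlinarith [mul_nonneg hs hge']
              have hcn1 : cn = a + 1 := by omega
              subst hcn1
              linear_combination -hn
            · rw [if_neg h2]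
          rw [hclamp]
          simp only [Prod.mk.injEq]
          refine ⟨by omega, by rw [hmin, hmin']; ring, by simp⟩
      rw [hstep, ih (a + 1) (acc ++ [cutPiece s y a]) (by omega) (by omega)]
      simp

-- ===== VERDICT (by name: the statement is the Claim_ definition above) =====

theorem cut_list_num_spec : Claim_equal_cut_list_num := by
  intro data_list cut_num _hdom hpre
  unfold Spec_cut_list_num cut_list_num cut_list_num_alt
  simp only []
  set n : Int := (data_list.length : Int) with hn
  set s := PySem.Int.floordiv n cut_num with hsdef
  set y := PySem.Int.mod n cut_num with hydef
  rw [foldl_append_map]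
  by_cases hc : 0 < cut_num
  · have hy0 : 0 ≤ y := PySem.Int.mod_nonneg n hc
    have hylt : y < cut_num := PySem.Int.mod_lt n hc
    have hmuladd : s * cut_num + y = n := PySem.Int.floordiv_mul_add_mod n cut_num
    have hn0 : 0 ≤ n := by positivity
    have hs0 : 0 ≤ s := by nlinarith
    have h0 := loopA_closed n cut_num s y hc hs0 hy0 hylt hmuladd cut_num.toNat 0 []
      (le_refl 0) (by omega)
    have hmin0 : min (0 : Int) y = 0 := by omega
    rw [hmin0] at h0
    simp only [zero_mul, zero_add, sub_zero, List.nil_append] at h0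
    rw [h0]
    simp [cutPiece]
  · have hle : cut_num ≤ 0 := by omega
    rw [PySem.List.pyRange_one_eq_nil hle]
    simp
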